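-- pv_equiv track=rewrite | github.com/Simon-Zeller/DesignOps-Agentic-Framework | src/daf/tools/priority_queue_builder.py | build_priority_queue
-- ===== SOURCE A (Python) =====
-- _TIER_ORDER = {"primitive": 0, "simple": 1, "complex": 2}
--
-- def build_priority_queue(
--     classified_components: list[dict],
--     topo_order: list[str],
-- ) -> list[dict]:
--     """Return classified components sorted primitive → simple → complex.
--
--     Within each tier, components are ordered by their position in *topo_order*
--     so that dependencies are always generated before dependents.
--
--     Args:
--         classified_components: List of dicts with ``name`` and ``tier`` keys.
--         topo_order: Topological order from :func:`dependency_graph_builder.topological_sort`.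
--
--     Returns:
--         Sorted list of component dicts.
--     """
--     topo_index = {name: i for i, name in enumerate(topo_order)}
--
--     def _sort_key(item: dict) -> tuple[int, int]:
--         tier_rank = _TIER_ORDER.get(item.get("tier", "simple"), 1)
--         position = topo_index.get(item.get("name", ""), len(topo_order))
--         return (tier_rank, position)
--
--     return sorted(classified_components, key=_sort_key)
-- ===== SOURCE B (Python) =====
-- _TIER_ORDER = {"primitive": 0, "simple": 1, "complex": 2}
--
--
-- def build_priority_queue(
--     classified_components: list[dict],
--     topo_order: list[str],
-- ) -> list[dict]:
--     """Bucket the components by tier in one pass, then stably sort each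
--     bucket by topological position and concatenate primitive+simple+complex."""
--     topo_index = {name: i for i, name in enumerate(topo_order)}
--     buckets = ([], [], [])
--     for item in classified_components:
--         buckets[_TIER_ORDER.get(item.get("tier", "simple"), 1)].append(item)
--     result = []
--     for bucket in buckets:
--         result.extend(
--             sorted(
--                 bucket,
--                 key=lambda it: topo_index.get(it.get("name", ""), len(topo_order)),
--             )
--         )
--     return result
-- ===== Notes on version B (the rewrite author's own statement) =====
-- stated objective: alternative
-- what changed: Replaces the single sort under a composite (tier_rank, position) key by a one-pass bucket partition into the three tiers followed by a stable per-bucket sort on topological position alone, concatenated primitive+simple+complex.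
import Mathlib
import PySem

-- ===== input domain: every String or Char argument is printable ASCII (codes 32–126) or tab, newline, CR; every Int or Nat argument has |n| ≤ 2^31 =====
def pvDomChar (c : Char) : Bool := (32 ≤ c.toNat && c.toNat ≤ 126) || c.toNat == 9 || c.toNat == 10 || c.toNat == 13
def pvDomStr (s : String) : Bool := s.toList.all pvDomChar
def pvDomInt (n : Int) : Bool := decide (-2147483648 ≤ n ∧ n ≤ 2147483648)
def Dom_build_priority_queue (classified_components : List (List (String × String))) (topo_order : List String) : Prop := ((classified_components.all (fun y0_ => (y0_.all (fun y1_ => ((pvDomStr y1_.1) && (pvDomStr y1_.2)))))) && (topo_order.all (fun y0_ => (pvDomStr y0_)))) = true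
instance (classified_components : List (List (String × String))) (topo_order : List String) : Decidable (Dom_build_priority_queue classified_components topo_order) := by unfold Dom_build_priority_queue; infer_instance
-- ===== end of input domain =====

-- B replaces A's single sort under the composite (tier_rank, position) key by a one-pass
-- partition into the three tier buckets followed by a stable per-bucket sort on position
-- alone, concatenated primitive+simple+complex (objective: alternative decomposition).


-- ===== PORT A =====
-- module constant _TIER_ORDER = {"primitive": 0, "simple": 1, "complex": 2}
def pvTIER_ORDER : PySem.Dict String Int :=
  PySem.Dict.mk [("primitive", 0), ("simple", 1), ("complex", 2)]

-- topo_index = {name: i for i, name in enumerate(topo_order)}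
def pvA_topo_index (topo_order : List String) : PySem.Dict String Int :=
  (PySem.List.enumerate topo_order).foldl
    (fun d p => d.insert p.2 p.1) PySem.Dict.empty

-- _sort_key's first component: _TIER_ORDER.get(item.get("tier", "simple"), 1)
def pvA_tier_rank (item : List (String × String)) : Int :=
  pvTIER_ORDER.getD ((PySem.Dict.mk item).getD "tier" "simple") 1

-- _sort_key's second component: topo_index.get(item.get("name", ""), len(topo_order))
def pvA_position (topo_order : List String) (item : List (String × String)) : Int :=
  (pvA_topo_index topo_order).getD ((PySem.Dict.mk item).getD "name" "") (topo_order.length : Int)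

-- return sorted(classified_components, key=_sort_key)   (tuple key → sorted2)
def build_priority_queue (classified_components : List (List (String × String))) (topo_order : List String) : List (List (String × String)) :=
  PySem.List.sorted2 classified_components pvA_tier_rank (pvA_position topo_order)

-- ===== PORT B =====
-- topo_index = {name: i for i, name in enumerate(topo_order)}  (B builds its own)
def pvB_topo_index (topo_order : List String) : PySem.Dict String Int :=
  (PySem.List.enumerate topo_order).foldl
    (fun d p => d.insert p.2 p.1) PySem.Dict.empty

-- B's per-bucket sort key: topo_index.get(it.get("name", ""), len(topo_order))
def pvB_pos (topo_order : List String) (it : List (String × String)) : Int :=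
  (pvB_topo_index topo_order).getD ((PySem.Dict.mk it).getD "name" "") (topo_order.length : Int)

-- the partition loop: buckets[_TIER_ORDER.get(item.get("tier","simple"),1)].append(item)
def pvB_buckets (classified_components : List (List (String × String))) :
    List (List (String × String)) × List (List (String × String)) × List (List (String × String)) :=
  classified_components.foldl
    (fun b item =>
      let r := pvTIER_ORDER.getD ((PySem.Dict.mk item).getD "tier" "simple") 1
      if r = 0 then (b.1 ++ [item], b.2.1, b.2.2)
      else if r = 1 then (b.1, b.2.1 ++ [item], b.2.2)
      else (b.1, b.2.1, b.2.2 ++ [item]))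
    ([], [], [])

-- result = per-bucket stable sorts, concatenated in tier order
def build_priority_queue_alt (classified_components : List (List (String × String))) (topo_order : List String) : List (List (String × String)) :=
  let bks := pvB_buckets classified_components
  PySem.List.sorted bks.1 (pvB_pos topo_order) ++
  PySem.List.sorted bks.2.1 (pvB_pos topo_order) ++
  PySem.List.sorted bks.2.2 (pvB_pos topo_order)

-- ===== PRECONDITION & SPEC =====
def Spec_build_priority_queue (classified_components : List (List (String × String))) (topo_order : List String) (out : List (List (String × String))) : Prop := out = build_priority_queue_alt classified_components topo_order
instance (classified_components : List (List (String × String))) (topo_order : List String) (out : List (List (String × String))) : Decidable (Spec_build_priority_queue classified_components topo_order out) := by unfold Spec_build_priority_queue; infer_instance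

-- ===== CLAIM (what is proved, stated in full; the proofs are below) =====
def Claim_equal_build_priority_queue : Prop := ∀ (classified_components : List (List (String × String))) (topo_order : List String), Dom_build_priority_queue classified_components topo_order → Spec_build_priority_queue classified_components topo_order (build_priority_queue classified_components topo_order)

-- ===== LEMMAS AND PROOFS =====

-- the lexicographic comparator sorted2 uses (reverse = False)
def pvLt2 {α : Type} (k1 k2 : α → Int) (a b : α) : Bool :=
  decide (k1 a < k1 b) || (!decide (k1 b < k1 a) && decide (k2 a < k2 b))

theorem pv_insertBy_nil {α : Type} (before : α → α → Bool) (x : α) :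
    PySem.List.insertBy before x [] = [x] := rfl

theorem pv_insertBy_cons {α : Type} (before : α → α → Bool) (x y : α) (ys : List α) :
    PySem.List.insertBy before x (y :: ys) =
      if before x y then x :: y :: ys else y :: PySem.List.insertBy before x ys := rfl

theorem pv_insertBy_append_right {α : Type} (before : α → α → Bool) (x : α)
    {A B : List α} (h : ∀ y ∈ A, before x y = false) :
    PySem.List.insertBy before x (A ++ B) = A ++ PySem.List.insertBy before x B := by
  induction A with
  | nil => simp
  | cons a A ih =>
      have ha := h a (by simp)
      simp [pv_insertBy_cons, ha, ih (fun y hy => h y (by simp [hy]))]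

theorem pv_insertBy_append_left {α : Type} (before : α → α → Bool) (x : α)
    {A B : List α} (h : ∀ y ∈ B, before x y = true) :
    PySem.List.insertBy before x (A ++ B) = PySem.List.insertBy before x A ++ B := by
  induction A with
  | nil =>
      cases B with
      | nil => simp
      | cons b B => simp [pv_insertBy_nil, pv_insertBy_cons, h b (by simp)]
  | cons a A ih =>
      by_cases hb : before x a = true <;>
        simp [pv_insertBy_cons, hb, ih]

theorem pv_insertBy_congr {α : Type} (before before' : α → α → Bool) (x : α)
    {ys : List α} (h : ∀ y ∈ ys, before x y = before' x y) :
    PySem.List.insertBy before x ys = PySem.List.insertBy before' x ys := by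
  induction ys with
  | nil => rfl
  | cons y ys ih =>
      have hy := h y (by simp)
      by_cases hb : before x y = true <;>
        simp [pv_insertBy_cons, hb, hy ▸ hb, ih (fun z hz => h z (by simp [hz]))]

-- the stable insertion sort under the lexicographic key splits along the first key
theorem pv_sorted2_split {α : Type} (k1 k2 : α → Int) (xs A0 A1 A2 : List α)
    (hx : ∀ x ∈ xs, k1 x = 0 ∨ k1 x = 1 ∨ k1 x = 2)
    (h0 : ∀ y ∈ A0, k1 y = 0) (h1 : ∀ y ∈ A1, k1 y = 1) (h2 : ∀ y ∈ A2, k1 y = 2) :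
    xs.foldl (fun acc x => PySem.List.insertBy (pvLt2 k1 k2) x acc) (A0 ++ (A1 ++ A2))
    = (xs.filter (fun x => k1 x == 0)).foldl
        (fun acc x => PySem.List.insertBy (fun a b => decide (k2 a < k2 b)) x acc) A0
      ++ ((xs.filter (fun x => k1 x == 1)).foldl
        (fun acc x => PySem.List.insertBy (fun a b => decide (k2 a < k2 b)) x acc) A1
      ++ (xs.filter (fun x => !(k1 x == 0) && !(k1 x == 1))).foldl
        (fun acc x => PySem.List.insertBy (fun a b => decide (k2 a < k2 b)) x acc) A2) := by
  induction xs generalizing A0 A1 A2 with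
  | nil => simp
  | cons x xs ih =>
      have hmem : ∀ z l, z ∈ PySem.List.insertBy (fun a b => decide (k2 a < k2 b)) x l → z = x ∨ z ∈ l := by
        intro z l hz
        exact (PySem.List.mem_insertBy _ _ _ _).mp hz
      rcases hx x (by simp) with hr | hr | hr
      · -- k1 x = 0
        have hstep : PySem.List.insertBy (pvLt2 k1 k2) x (A0 ++ (A1 ++ A2))
            = PySem.List.insertBy (fun a b => decide (k2 a < k2 b)) x A0 ++ (A1 ++ A2) := by
          rw [pv_insertBy_append_left]
          · congr 1
            apply pv_insertBy_congr
            intro y hy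
            simp [pvLt2, hr, h0 y hy]
          · intro y hy
            rcases List.mem_append.1 hy with hy | hy
            · simp [pvLt2, hr, h1 y hy]
            · simp [pvLt2, hr, h2 y hy]
        simp only [List.foldl_cons, hstep, hr, List.filter_cons]
        norm_num
        exact ih _ _ _ (fun z hz => hx z (by simp [hz]))
          (fun z hz => by rcases hmem z A0 hz with h | h; exacts [h ▸ hr, h0 z h]) h1 h2
      · -- k1 x = 1
        have hstep : PySem.List.insertBy (pvLt2 k1 k2) x (A0 ++ (A1 ++ A2))
            = A0 ++ (PySem.List.insertBy (fun a b => decide (k2 a < k2 b)) x A1 ++ A2) := by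
          rw [pv_insertBy_append_right (h := fun y hy => by simp [pvLt2, hr, h0 y hy]),
              pv_insertBy_append_left (h := fun y hy => by simp [pvLt2, hr, h2 y hy])]
          congr 2
          apply pv_insertBy_congr
          intro y hy
          simp [pvLt2, hr, h1 y hy]
        simp only [List.foldl_cons, hstep, hr, List.filter_cons]
        norm_num
        exact ih _ _ _ (fun z hz => hx z (by simp [hz])) h0
          (fun z hz => by rcases hmem z A1 hz with h | h; exacts [h ▸ hr, h1 z h]) h2
      · -- k1 x = 2
        have hstep : PySem.List.insertBy (pvLt2 k1 k2) x (A0 ++ (A1 ++ A2))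
            = A0 ++ (A1 ++ PySem.List.insertBy (fun a b => decide (k2 a < k2 b)) x A2) := by
          rw [pv_insertBy_append_right (h := fun y hy => by simp [pvLt2, hr, h0 y hy]),
              pv_insertBy_append_right (h := fun y hy => by simp [pvLt2, hr, h1 y hy])]
          congr 2
          apply pv_insertBy_congr
          intro y hy
          simp [pvLt2, hr, h2 y hy]
        simp only [List.foldl_cons, hstep, hr, List.filter_cons]
        norm_num
        exact ih _ _ _ (fun z hz => hx z (by simp [hz])) h0 h1
          (fun z hz => by rcases hmem z A2 hz with h | h; exacts [h ▸ hr, h2 z h])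
  
-- pvTIER_ORDER.getD _ 1 only takes the values 0, 1, 2
theorem pv_tier_rank_cases (item : List (String × String)) :
    pvA_tier_rank item = 0 ∨ pvA_tier_rank item = 1 ∨ pvA_tier_rank item = 2 := by
  simp only [pvA_tier_rank, pvTIER_ORDER, PySem.Dict.getD_eq_get?_getD, PySem.Dict.get?_mk_cons]
  split_ifs <;> simp [PySem.Dict.get?]

-- B's partition loop computes the three tier filters
theorem pv_buckets_eq (xs : List (List (String × String))) :
    pvB_buckets xs =
      (xs.filter (fun x => pvA_tier_rank x == 0),
       xs.filter (fun x => pvA_tier_rank x == 1),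
       xs.filter (fun x => !(pvA_tier_rank x == 0) && !(pvA_tier_rank x == 1))) := by
  suffices h : ∀ (b : List (List (String × String)) × List (List (String × String)) × List (List (String × String))),
      xs.foldl
        (fun b item =>
          let r := pvTIER_ORDER.getD ((PySem.Dict.mk item).getD "tier" "simple") 1
          if r = 0 then (b.1 ++ [item], b.2.1, b.2.2)
          else if r = 1 then (b.1, b.2.1 ++ [item], b.2.2)
          else (b.1, b.2.1, b.2.2 ++ [item])) b
      = (b.1 ++ xs.filter (fun x => pvA_tier_rank x == 0),
         b.2.1 ++ xs.filter (fun x => pvA_tier_rank x == 1),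
         b.2.2 ++ xs.filter (fun x => !(pvA_tier_rank x == 0) && !(pvA_tier_rank x == 1))) by
    have := h ([], [], [])
    simpa [pvB_buckets] using this
  induction xs with
  | nil => intro b; simp
  | cons x xs ih =>
      intro b
      have hr : pvTIER_ORDER.getD ((PySem.Dict.mk x).getD "tier" "simple") 1 = pvA_tier_rank x := rfl
      by_cases h0 : pvA_tier_rank x = 0
      · simp [List.foldl_cons, hr, h0, ih]
      · by_cases h1 : pvA_tier_rank x = 1 <;>
          simp [List.foldl_cons, hr, h0, h1, ih]

-- ===== VERDICT (by name: the statement is the Claim_ definition above) =====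
theorem build_priority_queue_spec : Claim_equal_build_priority_queue := by
  intro cc topo _
  show build_priority_queue cc topo = build_priority_queue_alt cc topo
  have hpos : pvB_pos topo = pvA_position topo := rfl
  have hA : build_priority_queue cc topo
      = cc.foldl (fun acc x => PySem.List.insertBy (pvLt2 pvA_tier_rank (pvA_position topo)) x acc) [] := rfl
  have hsorted : ∀ l : List (List (String × String)),
      PySem.List.sorted l (pvA_position topo)
        = l.foldl (fun acc x => PySem.List.insertBy (fun a b => decide (pvA_position topo a < pvA_position topo b)) x acc) [] := by
    intro l; rfl
  have hsplit := pv_sorted2_split pvA_tier_rank (pvA_position topo) cc [] [] []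
    (fun x _ => pv_tier_rank_cases x) (by simp) (by simp) (by simp)
  simp only [List.nil_append] at hsplit
  rw [hA, hsplit, build_priority_queue_alt, pv_buckets_eq, hpos]
  simp [hsorted, List.append_assoc]
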